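-- pv_equiv track=rewrite | github.com/PW-AC/ATLAS-DesktopClient | tools/decrypt_iwm_password.py | try_subtract_decrypt
-- ===== SOURCE A (Python) =====
-- def try_subtract_decrypt(encrypted_bytes: list[int]) -> dict:
--     """Versucht Subtraktions-Entschlüsselung."""
--     results = {}
--
--     for offset in range(256):
--         decrypted = bytes([(b - offset) % 256 for b in encrypted_bytes])
--         try:
--             text = decrypted.decode('latin-1')
--             if all(32 <= b < 127 for b in decrypted):
--                 results[f'sub_{offset}'] = text
--         except:
--             pass
--
--     return results
-- ===== SOURCE B (Python) =====
-- def try_subtract_decrypt(encrypted_bytes: list[int]) -> dict: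
--     """Difference-array arc intersection: each byte b allows offsets in the
--     circular arc [(b-126)%256, (b-32)%256]; mark all arcs in a diff array,
--     prefix-sum it, and decode only the offsets every byte allows."""
--     n = len(encrypted_bytes)
--     diff = [0] * 257
--     for b in encrypted_bytes:
--         lo = (b - 126) % 256
--         hi = (b - 32) % 256
--         if lo <= hi:
--             diff[lo] += 1
--             diff[hi + 1] -= 1
--         else:
--             diff[0] += 1
--             diff[hi + 1] -= 1
--             diff[lo] += 1
--             diff[256] -= 1
--     results = {}
--     cnt = 0
--     for offset in range(256):
--         cnt += diff[offset]
--         if cnt == n: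
--             results[f'sub_{offset}'] = ''.join(chr((b - offset) % 256) for b in encrypted_bytes)
--     return results
-- ===== Notes on version B (the rewrite author's own statement) =====
-- stated objective: faster
-- what changed: B never tests offsets against bytes: each byte contributes one circular arc of allowed offsets to a 256-entry difference array in a single pass over the input, and a prefix-sum over the 256 counters identifies the valid offsets, which are the only ones decoded (A scans all n bytes for each of the 256 offsets and decodes every candidate).
import Mathlib
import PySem

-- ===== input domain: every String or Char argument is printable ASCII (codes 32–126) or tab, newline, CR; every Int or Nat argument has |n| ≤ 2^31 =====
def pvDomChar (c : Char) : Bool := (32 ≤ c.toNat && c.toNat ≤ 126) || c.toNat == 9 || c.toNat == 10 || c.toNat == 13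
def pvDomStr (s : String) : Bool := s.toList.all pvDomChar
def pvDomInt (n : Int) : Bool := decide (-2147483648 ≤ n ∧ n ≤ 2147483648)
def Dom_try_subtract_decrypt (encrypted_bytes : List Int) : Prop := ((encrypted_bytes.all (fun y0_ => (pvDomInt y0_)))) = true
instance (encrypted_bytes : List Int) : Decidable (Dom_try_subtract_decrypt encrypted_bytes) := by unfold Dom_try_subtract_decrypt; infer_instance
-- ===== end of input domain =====

-- B replaces A's per-offset scan of all bytes by a per-byte allowed-offset arc
-- marked in a difference array; a prefix sum over 256 counters picks the valid
-- offsets and only those are decoded (objective: faster).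


-- ===== PORT A =====
-- latin-1 decode never fails on bytes 0..255, so the try/except never catches: byte k decodes to Char.ofNat k (exact).
def try_subtract_decrypt (encrypted_bytes : List Int) : List (String × String) :=
  ((PySem.List.pyRange 0 256 1).foldl (fun results offset =>
    let decrypted := encrypted_bytes.map (fun b => PySem.Int.mod (b - offset) 256)
    let text := String.ofList (decrypted.map (fun x => Char.ofNat x.toNat))
    if decrypted.all (fun x => decide (32 ≤ x) && decide (x < 127)) then
      PySem.Dict.insert results ("sub_" ++ PySem.Int.toStr offset) text
    else results) PySem.Dict.empty).items

-- ===== PORT B =====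
-- diff[i] += v  (the in-place update of B's difference array)
def pvBump (d : List Int) (i : Nat) (v : Int) : List Int := d.set i (d.getD i 0 + v)

-- one byte's circular arc of allowed offsets, added to the difference array
def pvArcAdd (d : List Int) (b : Int) : List Int :=
  let lo := PySem.Int.mod (b - 126) 256
  let hi := PySem.Int.mod (b - 32) 256
  if lo ≤ hi then
    pvBump (pvBump d lo.toNat 1) (hi.toNat + 1) (-1)
  else
    pvBump (pvBump (pvBump (pvBump d 0 1) (hi.toNat + 1) (-1)) lo.toNat 1) 256 (-1)

def try_subtract_decrypt_alt (encrypted_bytes : List Int) : List (String × String) :=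
  let n : Int := encrypted_bytes.length
  let diff := encrypted_bytes.foldl pvArcAdd (List.replicate 257 0)
  ((PySem.List.pyRange 0 256 1).foldl (fun (st : Int × PySem.Dict String String) offset =>
      let cnt := st.1 + diff.getD offset.toNat 0
      let results := if cnt = n then
          PySem.Dict.insert st.2 ("sub_" ++ PySem.Int.toStr offset)
            (String.ofList (encrypted_bytes.map (fun b => Char.ofNat (PySem.Int.mod (b - offset) 256).toNat)))
        else st.2
      (cnt, results)) ((0 : Int), PySem.Dict.empty)).2.items

-- ===== PRECONDITION & SPEC =====
def Spec_try_subtract_decrypt (encrypted_bytes : List Int) (out : List (String × String)) : Prop := out = try_subtract_decrypt_alt encrypted_bytes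
instance (encrypted_bytes : List Int) (out : List (String × String)) : Decidable (Spec_try_subtract_decrypt encrypted_bytes out) := by unfold Spec_try_subtract_decrypt; infer_instance

-- ===== CLAIM (what is proved, stated in full; the proofs are below) =====
def Claim_equal_try_subtract_decrypt : Prop := ∀ (encrypted_bytes : List Int), Dom_try_subtract_decrypt encrypted_bytes → Spec_try_subtract_decrypt encrypted_bytes (try_subtract_decrypt encrypted_bytes)

-- ===== LEMMAS AND PROOFS =====

-- exclusive prefix sum of the difference array
def pvPre (d : List Int) (a : Nat) : Int := ∑ i ∈ Finset.range a, d.getD i 0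

-- does offset o decrypt byte b into printable ASCII?
def pvInArc (b o : Int) : Bool := decide (32 ≤ (b - o) % 256) && decide ((b - o) % 256 < 127)

theorem pvArcAdd_def (d : List Int) (b : Int) : pvArcAdd d b =
    if PySem.Int.mod (b - 126) 256 ≤ PySem.Int.mod (b - 32) 256 then
      pvBump (pvBump d (PySem.Int.mod (b - 126) 256).toNat 1) ((PySem.Int.mod (b - 32) 256).toNat + 1) (-1)
    else
      pvBump (pvBump (pvBump (pvBump d 0 1) ((PySem.Int.mod (b - 32) 256).toNat + 1) (-1)) (PySem.Int.mod (b - 126) 256).toNat 1) 256 (-1) := rfl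

theorem pvBump_length (d : List Int) (i : Nat) (v : Int) : (pvBump d i v).length = d.length := by
  simp [pvBump]

theorem pvArcAdd_length (d : List Int) (b : Int) : (pvArcAdd d b).length = d.length := by
  rw [pvArcAdd_def]
  split <;> simp [pvBump_length]

theorem pvBump_getD (d : List Int) (i j : Nat) (v : Int) (hi : i < d.length) :
    (pvBump d i v).getD j 0 = d.getD j 0 + (if j = i then v else 0) := by
  simp only [pvBump, List.getD_eq_getElem?_getD, List.getElem?_set]
  by_cases hij : j = i
  · subst hij; simp [hi]
  · simp [hij, show ¬ i = j from fun h => hij h.symm]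

theorem pvPre_bump (d : List Int) (i : Nat) (v : Int) (a : Nat) (hi : i < d.length) :
    pvPre (pvBump d i v) a = pvPre d a + (if i < a then v else 0) := by
  unfold pvPre
  simp only [pvBump_getD d i _ v hi, Finset.sum_add_distrib,
    Finset.sum_ite_eq' (Finset.range a) i (fun _ => v), Finset.mem_range]

theorem pvPre_arcAdd (d : List Int) (b : Int) (o : Nat) (hlen : d.length = 257) (ho : o < 256) :
    pvPre (pvArcAdd d b) (o + 1) = pvPre d (o + 1) + (if pvInArc b (o : Int) then 1 else 0) := by
  rw [pvArcAdd_def]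
  rw [PySem.Int.mod_eq_emod_of_pos (by norm_num : (0:Int) < 256),
      PySem.Int.mod_eq_emod_of_pos (by norm_num : (0:Int) < 256)]
  have hlo : 0 ≤ (b - 126) % 256 := Int.emod_nonneg _ (by norm_num)
  have hlo' : (b - 126) % 256 < 256 := Int.emod_lt_of_pos _ (by norm_num)
  have hhi : 0 ≤ (b - 32) % 256 := Int.emod_nonneg _ (by norm_num)
  have hhi' : (b - 32) % 256 < 256 := Int.emod_lt_of_pos _ (by norm_num)
  have harc : pvInArc b (o : Int) = true ↔ (32 ≤ (b - (o:Int)) % 256 ∧ (b - (o:Int)) % 256 < 127) := by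
    simp [pvInArc]
  have l1 : (pvBump d ((b - 126) % 256).toNat 1).length = 257 := by rw [pvBump_length, hlen]
  have m1 : (pvBump d 0 1).length = 257 := by rw [pvBump_length, hlen]
  have m2 : (pvBump (pvBump d 0 1) (((b - 32) % 256).toNat + 1) (-1)).length = 257 := by
    rw [pvBump_length, m1]
  have m3 : (pvBump (pvBump (pvBump d 0 1) (((b - 32) % 256).toNat + 1) (-1)) ((b - 126) % 256).toNat 1).length = 257 := by
    rw [pvBump_length, m2]
  rcases Bool.eq_false_or_eq_true (pvInArc b (o : Int)) with hB | hB
  · have hA := harc.mp hB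
    rw [hB]
    split
    · rw [pvPre_bump _ _ _ _ (by rw [l1]; omega), pvPre_bump _ _ _ _ (by rw [hlen]; omega)]
      simp only [if_true]
      split_ifs <;> omega
    · rw [pvPre_bump _ _ _ _ (by rw [m3]; omega), pvPre_bump _ _ _ _ (by rw [m2]; omega),
          pvPre_bump _ _ _ _ (by rw [m1]; omega), pvPre_bump _ _ _ _ (by rw [hlen]; omega)]
      simp only [if_true]
      split_ifs <;> omega
  · have hA : ¬ (32 ≤ (b - (o:Int)) % 256 ∧ (b - (o:Int)) % 256 < 127) := by
      rw [← harc]; simp [hB]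
    rw [hB]
    split
    · rw [pvPre_bump _ _ _ _ (by rw [l1]; omega), pvPre_bump _ _ _ _ (by rw [hlen]; omega)]
      simp only [Bool.false_eq_true, if_false]
      split_ifs <;> omega
    · rw [pvPre_bump _ _ _ _ (by rw [m3]; omega), pvPre_bump _ _ _ _ (by rw [m2]; omega),
          pvPre_bump _ _ _ _ (by rw [m1]; omega), pvPre_bump _ _ _ _ (by rw [hlen]; omega)]
      simp only [Bool.false_eq_true, if_false]
      split_ifs <;> omega

theorem pvPre_fold (xs : List Int) (d : List Int) (o : Nat) (hlen : d.length = 257) (ho : o < 256) :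
    pvPre (xs.foldl pvArcAdd d) (o + 1)
      = pvPre d (o + 1) + (xs.countP (fun b => pvInArc b (o : Int)) : Int) := by
  induction xs generalizing d with
  | nil => simp
  | cons x xs ih =>
    simp only [List.foldl_cons, List.countP_cons]
    rw [ih (pvArcAdd d x) (by rw [pvArcAdd_length, hlen]), pvPre_arcAdd d x o hlen ho]
    by_cases h : pvInArc x (o : Int)
    · simp [h]; ring
    · simp [h]

theorem pvPre_replicate (a : Nat) : pvPre (List.replicate 257 0) a = 0 := by
  unfold pvPre
  apply Finset.sum_eq_zero
  intro i _
  simp only [List.getD_eq_getElem?_getD, List.getElem?_replicate]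
  split <;> rfl

-- the valid-offset test of B (prefix count = n) ↔ the printability test of A
theorem pvCount_iff (xs : List Int) (o : Nat) (ho : o < 256) :
    (pvPre (xs.foldl pvArcAdd (List.replicate 257 0)) (o + 1) = (xs.length : Int))
      ↔ ((xs.map (fun b => PySem.Int.mod (b - (o:Int)) 256)).all
            (fun x => decide (32 ≤ x) && decide (x < 127)) = true) := by
  rw [pvPre_fold xs _ o (by rw [List.length_replicate]) ho, pvPre_replicate, zero_add]
  have hpred : ∀ b : Int,
      pvInArc b (o : Int)
        = (decide (32 ≤ PySem.Int.mod (b - (o:Int)) 256) && decide (PySem.Int.mod (b - (o:Int)) 256 < 127)) := by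
    intro b
    rw [PySem.Int.mod_eq_emod_of_pos (by norm_num : (0:Int) < 256)]
    rfl
  rw [List.all_map]
  constructor
  · intro h
    have hc : xs.countP (fun b => pvInArc b (o : Int)) = xs.length := by exact_mod_cast h
    rw [List.all_eq_true]
    intro b hb
    have := List.countP_eq_length.mp hc b hb
    simp only [Function.comp_def]
    simp only [hpred] at this
    exact this
  · intro h
    have hc : xs.countP (fun b => pvInArc b (o : Int)) = xs.length := by
      apply List.countP_eq_length.mpr
      intro b hb
      rw [List.all_eq_true] at h
      have := h b hb
      simp only [Function.comp_def] at this
      simp only [hpred]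
      exact this
    exact_mod_cast hc

-- the two loop bodies, named for the proofs (definitionally the ports' lambdas)
def pvStepA (xs : List Int) (results : PySem.Dict String String) (offset : Int) : PySem.Dict String String :=
  let decrypted := xs.map (fun b => PySem.Int.mod (b - offset) 256)
  let text := String.ofList (decrypted.map (fun x => Char.ofNat x.toNat))
  if decrypted.all (fun x => decide (32 ≤ x) && decide (x < 127)) then
    PySem.Dict.insert results ("sub_" ++ PySem.Int.toStr offset) text
  else results

def pvStepB (xs diff : List Int) (st : Int × PySem.Dict String String) (offset : Int) :
    Int × PySem.Dict String String :=
  let cnt := st.1 + diff.getD offset.toNat 0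
  let results := if cnt = (xs.length : Int) then
      PySem.Dict.insert st.2 ("sub_" ++ PySem.Int.toStr offset)
        (String.ofList (xs.map (fun b => Char.ofNat (PySem.Int.mod (b - offset) 256).toNat)))
    else st.2
  (cnt, results)

-- B's running prefix count simulates A's per-offset scan over the tail of the offset range
theorem pvLoop (xs : List Int) (m : Nat) :
    ∀ (k : Nat), k + m = 256 → ∀ (res : PySem.Dict String String),
    (((PySem.List.pyRange (k : Int) 256 1).foldl
        (pvStepB xs (xs.foldl pvArcAdd (List.replicate 257 0)))
        (pvPre (xs.foldl pvArcAdd (List.replicate 257 0)) k, res)).2)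
      = (PySem.List.pyRange (k : Int) 256 1).foldl (pvStepA xs) res := by
  induction m with
  | zero =>
    intro k hk res
    rw [PySem.List.pyRange_one_eq_nil (by omega)]
    rfl
  | succ m ih =>
    intro k hk res
    rw [PySem.List.pyRange_one_cons (by exact_mod_cast Nat.lt_of_lt_of_le (by omega) (le_refl 256))]
    simp only [List.foldl_cons]
    have hcnt : pvPre (xs.foldl pvArcAdd (List.replicate 257 0)) k
        + (xs.foldl pvArcAdd (List.replicate 257 0)).getD ((k : Int)).toNat 0
        = pvPre (xs.foldl pvArcAdd (List.replicate 257 0)) (k + 1) := by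
      unfold pvPre
      rw [Finset.sum_range_succ, Int.toNat_natCast]
    have hcond := pvCount_iff xs k (by omega)
    have hstep : pvStepB xs (xs.foldl pvArcAdd (List.replicate 257 0))
          (pvPre (xs.foldl pvArcAdd (List.replicate 257 0)) k, res) (k : Int)
        = (pvPre (xs.foldl pvArcAdd (List.replicate 257 0)) (k + 1),
            pvStepA xs res (k : Int)) := by
      unfold pvStepB pvStepA
      simp only [hcnt]
      congr 1
      rw [List.map_map]
      by_cases h : ((xs.map (fun b => PySem.Int.mod (b - (k:Int)) 256)).all
          (fun x => decide (32 ≤ x) && decide (x < 127)) = true)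
      · rw [if_pos (hcond.mpr h), if_pos h]
        rfl
      · rw [if_neg (fun hc => h (hcond.mp hc)), if_neg h]
    rw [hstep]
    have : ((k : Int) + 1) = ((k + 1 : Nat) : Int) := by push_cast; ring
    rw [this]
    exact ih (k + 1) (by omega) (pvStepA xs res (k : Int))

-- ===== VERDICT (by name: the statement is the Claim_ definition above) =====
set_option maxRecDepth 4096 in
theorem try_subtract_decrypt_spec : Claim_equal_try_subtract_decrypt := by
  intro xs _
  unfold Spec_try_subtract_decrypt
  have hA : try_subtract_decrypt xs
      = ((PySem.List.pyRange 0 256 1).foldl (pvStepA xs) PySem.Dict.empty).items := rfl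
  have hB : try_subtract_decrypt_alt xs
      = (((PySem.List.pyRange 0 256 1).foldl
            (pvStepB xs (xs.foldl pvArcAdd (List.replicate 257 0)))
            ((0 : Int), PySem.Dict.empty)).2).items := rfl
  rw [hA, hB]
  congr 1
  have h0 : pvPre (xs.foldl pvArcAdd (List.replicate 257 0)) 0 = 0 := by unfold pvPre; exact Finset.sum_range_zero _
  have := pvLoop xs 256 0 rfl PySem.Dict.empty
  rw [h0] at this
  exact this.symm
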